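-- pv_equiv track=rewrite | github.com/scDiffEq/scdiffeq-analyses | scdiffeq_analyses/hp_scan/_distribute_experiments.py | distribute_experiments
-- ===== SOURCE A (Python) =====
-- from typing import Any, Dict, List
--
-- def distribute_experiments(
--     experiments: List[Dict[str, Any]], num_vms: int
-- ) -> Dict[str, List[int]]:
--     """
--     Distribute experiments across VMs.
--
--     Args:
--         experiments: List of experiment configurations
--         num_vms: Number of VMs to distribute experiments across
--
--     Returns:
--         Dictionary mapping VM names to lists of experiment IDs
--     """
--     vm_to_experiments = {}
--     num_experiments = len(experiments)
--
--     # Calculate number of experiments per VM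
--     experiments_per_vm = (num_experiments + num_vms - 1) // num_vms  # Ceiling division
--
--     for i in range(num_vms):
--         vm_name = f"scdiffeq-vm-{i+1}"
--         start_idx = i * experiments_per_vm
--         end_idx = min((i + 1) * experiments_per_vm, num_experiments)
--
--         vm_experiments = [experiments[j]["id"] for j in range(start_idx, end_idx)]
--         if vm_experiments:  # Only add VMs that have experiments to run
--             vm_to_experiments[vm_name] = vm_experiments
--
--     return vm_to_experiments
-- ===== SOURCE B (Python) =====
-- from typing import Any, Dict, List
--
-- def distribute_experiments(
--     experiments: List[Dict[str, Any]], num_vms: int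
-- ) -> Dict[str, List[int]]:
--     """Distribute experiments across VMs: build the per-slot VM-name table once,
--     then route each experiment to its VM in a single zipped pass."""
--     # Ceiling division (raises ZeroDivisionError for num_vms == 0, as intended)
--     experiments_per_vm = (len(experiments) + num_vms - 1) // num_vms
--     names = [f"scdiffeq-vm-{i + 1}" for i in range(num_vms) for _ in range(experiments_per_vm)]
--     vm_to_experiments = {}
--     for experiment, vm_name in zip(experiments, names):
--         vm_to_experiments.setdefault(vm_name, []).append(experiment["id"])
--     return vm_to_experiments
-- ===== Notes on version B (the rewrite author's own statement) =====
-- stated objective: alternative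
-- what changed: Replaces A's per-VM loop that slices experiments[start:end] with min-clamping and an emptiness guard by building the per-slot VM-name table once and routing each experiment to its VM bucket in a single zipped pass with setdefault.
import Mathlib
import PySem

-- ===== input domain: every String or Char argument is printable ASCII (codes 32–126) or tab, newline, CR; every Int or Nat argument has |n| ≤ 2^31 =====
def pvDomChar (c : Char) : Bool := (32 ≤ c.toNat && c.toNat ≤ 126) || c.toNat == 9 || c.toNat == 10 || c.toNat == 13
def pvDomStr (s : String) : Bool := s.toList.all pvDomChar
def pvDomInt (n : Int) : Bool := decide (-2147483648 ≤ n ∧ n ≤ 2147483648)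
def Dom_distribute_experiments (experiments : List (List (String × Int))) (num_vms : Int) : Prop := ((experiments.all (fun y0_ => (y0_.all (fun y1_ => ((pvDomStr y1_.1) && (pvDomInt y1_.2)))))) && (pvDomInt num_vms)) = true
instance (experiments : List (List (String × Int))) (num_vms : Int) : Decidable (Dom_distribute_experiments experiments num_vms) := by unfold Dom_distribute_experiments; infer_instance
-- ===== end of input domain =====

-- B replaces A's per-VM slicing loop (index arithmetic, min-clamping, emptiness guard) by
-- building the per-slot VM-name table once and routing each experiment to its VM in a single
-- zipped pass (objective: alternative one-pass routing decomposition, same cost).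

-- ===== PORT A =====
def distribute_experiments (experiments : List (List (String × Int))) (num_vms : Int) : List (String × List Int) :=
  let num_experiments : Int := experiments.length
  let experiments_per_vm : Int := PySem.Int.floordiv (num_experiments + num_vms - 1) num_vms
  let d : PySem.Dict String (List Int) :=
    (PySem.List.pyRange 0 num_vms 1).foldl (fun acc i =>
      let vm_name := "scdiffeq-vm-" ++ PySem.Int.toStr (i + 1)
      let start_idx := i * experiments_per_vm
      let end_idx := min ((i + 1) * experiments_per_vm) num_experiments
      let vm_experiments := (PySem.List.pyRange start_idx end_idx 1).map
        (fun j => ((PySem.Dict.mk ((PySem.List.pyGet? experiments j).getD [])).get? "id").getD 0)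
      if vm_experiments ≠ [] then acc.insert vm_name vm_experiments else acc)
      PySem.Dict.empty
  d.items

-- ===== PORT B =====
def distribute_experiments_alt (experiments : List (List (String × Int))) (num_vms : Int) : List (String × List Int) :=
  let experiments_per_vm : Int := PySem.Int.floordiv ((experiments.length : Int) + num_vms - 1) num_vms
  let names : List String := (PySem.List.pyRange 0 num_vms 1).flatMap
    (fun i => (PySem.List.pyRange 0 experiments_per_vm 1).map
      (fun _ => "scdiffeq-vm-" ++ PySem.Int.toStr (i + 1)))
  let d : PySem.Dict String (List Int) :=
    (experiments.zip names).foldl (fun acc p =>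
      -- setdefault(vm_name, []).append(id): value becomes old-or-[] with the id appended,
      -- key position as Python's setdefault (existing key keeps its slot, new key appends)
      acc.insert p.2 (acc.getD p.2 [] ++ [((PySem.Dict.mk p.1).get? "id").getD 0]))
      PySem.Dict.empty
  d.items

-- ===== PRECONDITION & SPEC =====
-- Pre_ excludes exactly the inputs on which Python A raises: num_vms = 0 (ZeroDivisionError in
-- the ceiling division) and, for num_vms > 0, an experiment without an "id" key (KeyError;
-- with num_vms < 0 A touches no experiment and returns {}, so those inputs stay included).
def Pre_distribute_experiments (experiments : List (List (String × Int))) (num_vms : Int) : Prop :=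
  num_vms ≠ 0 ∧ (0 < num_vms → ∀ e ∈ experiments, (PySem.Dict.mk e).contains "id" = true)
instance (experiments : List (List (String × Int))) (num_vms : Int) : Decidable (Pre_distribute_experiments experiments num_vms) := by unfold Pre_distribute_experiments; infer_instance

def pvWitness_distribute_experiments : (List (List (String × Int))) × Int :=
  ([[("id", 1)], [("id", 2)], [("id", 3)]], 2)

def Spec_distribute_experiments (experiments : List (List (String × Int))) (num_vms : Int) (out : List (String × List Int)) : Prop := out = distribute_experiments_alt experiments num_vms
instance (experiments : List (List (String × Int))) (num_vms : Int) (out : List (String × List Int)) : Decidable (Spec_distribute_experiments experiments num_vms out) := by unfold Spec_distribute_experiments; infer_instance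

-- ===== CLAIM (what is proved, stated in full; the proofs are below) =====
def Claim_equal_distribute_experiments : Prop := ∀ (experiments : List (List (String × Int))) (num_vms : Int), Dom_distribute_experiments experiments num_vms → Pre_distribute_experiments experiments num_vms → Spec_distribute_experiments experiments num_vms (distribute_experiments experiments num_vms)

-- ===== LEMMAS AND PROOFS =====

-- ---- decimal string injectivity (both ports name VMs "scdiffeq-vm-<t+1>") ----

theorem pvToDigitsCore_acc (fuel : Nat) : ∀ (n : Nat) (acc : List Char),
    Nat.toDigitsCore 10 fuel n acc = Nat.toDigitsCore 10 fuel n [] ++ acc := by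
  induction fuel with
  | zero => intro n acc; simp [Nat.toDigitsCore]
  | succ f ih =>
    intro n acc
    simp only [Nat.toDigitsCore]
    by_cases h : n / 10 = 0
    · simp [h]
    · simp only [if_neg h]
      rw [ih (n / 10) ((n % 10).digitChar :: acc), ih (n / 10) [(n % 10).digitChar]]
      simp

theorem pvToDigitsCore_fuel (n : Nat) : ∀ (fuel fuel' : Nat), n < fuel → n < fuel' →
    Nat.toDigitsCore 10 fuel n [] = Nat.toDigitsCore 10 fuel' n [] := by
  induction n using Nat.strong_induction_on with
  | _ n ih =>
    intro fuel fuel' h h'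
    obtain ⟨f, rfl⟩ : ∃ f, fuel = f + 1 := ⟨fuel - 1, by omega⟩
    obtain ⟨f', rfl⟩ : ∃ g, fuel' = g + 1 := ⟨fuel' - 1, by omega⟩
    simp only [Nat.toDigitsCore]
    by_cases h0 : n / 10 = 0
    · simp [h0]
    · simp only [if_neg h0]
      have hlt : n / 10 < n := Nat.div_lt_self (by omega) (by omega)
      rw [pvToDigitsCore_acc f, pvToDigitsCore_acc f',
        ih (n / 10) hlt f f' (by omega) (by omega)]

theorem pvToDigits_lt (n : Nat) (h : n < 10) : Nat.toDigits 10 n = [n.digitChar] := by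
  have h0 : n / 10 = 0 := Nat.div_eq_of_lt h
  simp [Nat.toDigits, Nat.toDigitsCore, h0, Nat.mod_eq_of_lt h]

theorem pvToDigits_ge (n : Nat) (h : 10 ≤ n) :
    Nat.toDigits 10 n = Nat.toDigits 10 (n / 10) ++ [(n % 10).digitChar] := by
  have h0 : n / 10 ≠ 0 := by
    intro hc; have := Nat.div_eq_of_lt (show n < 10 by omega); omega
  show Nat.toDigitsCore 10 (n + 1) n [] = _
  obtain ⟨f, hf⟩ : ∃ f, n + 1 = f + 1 := ⟨n, rfl⟩
  rw [hf]
  simp only [Nat.toDigitsCore, if_neg h0]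
  rw [pvToDigitsCore_acc f (n / 10) [(n % 10).digitChar]]
  congr 1
  exact pvToDigitsCore_fuel (n / 10) f (n / 10 + 1)
    (by omega) (by omega)

def pvParse (cs : List Char) : Nat := cs.foldl (fun a c => a * 10 + (c.toNat - 48)) 0

theorem pvDigitChar_toNat (d : Nat) (h : d < 10) : (Nat.digitChar d).toNat - 48 = d := by
  interval_cases d <;> decide

theorem pvParse_toDigits (n : Nat) : pvParse (Nat.toDigits 10 n) = n := by
  induction n using Nat.strong_induction_on with
  | _ n ih =>
    by_cases h : n < 10
    · rw [pvToDigits_lt n h]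
      simp [pvParse, pvDigitChar_toNat n h]
    · rw [pvToDigits_ge n (by omega)]
      have hlt : n / 10 < n := Nat.div_lt_self (by omega) (by omega)
      have := ih (n / 10) hlt
      simp only [pvParse, List.foldl_append, List.foldl_cons, List.foldl_nil] at *
      rw [this, pvDigitChar_toNat (n % 10) (Nat.mod_lt n (by omega))]
      omega

theorem pvToDigits_inj {a b : Nat} (h : Nat.toDigits 10 a = Nat.toDigits 10 b) : a = b := by
  have := pvParse_toDigits a
  rw [h, pvParse_toDigits b] at this
  omega

theorem pvToStr_inj {a b : Int} (ha : 0 ≤ a) (hb : 0 ≤ b)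
    (h : PySem.Int.toStr a = PySem.Int.toStr b) : a = b := by
  have h' : (PySem.Int.toStr a).toList = (PySem.Int.toStr b).toList := by rw [h]
  rw [PySem.Int.toList_toStr, PySem.Int.toList_toStr] at h'
  unfold PySem.Int.toChars at h'
  rw [if_neg (by omega), if_neg (by omega)] at h'
  have := pvToDigits_inj h'
  omega

def pvNm (t : Nat) : String := "scdiffeq-vm-" ++ PySem.Int.toStr ((t : Int) + 1)

theorem pvNm_inj {s t : Nat} (h : pvNm s = pvNm t) : s = t := by
  unfold pvNm at h
  have h' := congrArg String.toList h
  rw [String.toList_append, String.toList_append] at h'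
  have h'' := List.append_cancel_left h'
  have := pvToStr_inj (a := (s : Int) + 1) (b := (t : Int) + 1)
    (by omega) (by omega) (String.toList_inj.mp h'')
  omega

-- ---- the common result shape: chunks of the id list, named per VM ----

def pvIdOf (e : List (String × Int)) : Int := ((PySem.Dict.mk e).get? "id").getD 0

def pvR (ids : List Int) (k g : Nat) : List (String × List Int) :=
  (List.range g).map (fun t => (pvNm t, (ids.drop (t * k)).take k))

theorem pvR_keys (ids : List Int) (k g : Nat) :
    (PySem.Dict.mk (pvR ids k g)).keys = (List.range g).map pvNm := by
  simp [PySem.Dict.keys, pvR, Function.comp]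

theorem pvR_keys_nodup (ids : List Int) (k g : Nat) :
    (PySem.Dict.mk (pvR ids k g)).keys.Nodup := by
  rw [pvR_keys]
  exact (List.nodup_range).map (fun a b => pvNm_inj)

theorem pvNm_not_mem {g t : Nat} (h : g ≤ t) : pvNm t ∉ (List.range g).map pvNm := by
  intro hmem
  obtain ⟨s, hs, hst⟩ := List.mem_map.mp hmem
  have := pvNm_inj hst
  simp only [List.mem_range] at hs
  omega

theorem pvFoldl_id {α β : Type} (l : List α) (acc : β) :
    l.foldl (fun a _ => a) acc = acc := by
  induction l generalizing acc with
  | nil => rfl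
  | cons x xs ih => simp only [List.foldl_cons]; exact ih acc

-- map over a pyRange of indices = a slice of the mapped list
theorem pvMap_get_range (exps : List (List (String × Int))) (a : Nat) :
    ∀ (b : Nat), b ≤ exps.length → a ≤ b →
    (PySem.List.pyRange (a : Int) (b : Int) 1).map
        (fun j => ((PySem.Dict.mk ((PySem.List.pyGet? exps j).getD [])).get? "id").getD 0) =
      ((exps.map pvIdOf).drop a).take (b - a) := by
  intro b
  induction b with
  | zero =>
    intro _ hab
    have ha : a = 0 := by omega
    subst ha
    simp [PySem.List.pyRange_one_eq_nil (by omega : (0:Int) ≤ 0)]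
  | succ b ih =>
    intro hb hab
    by_cases hab' : a = b + 1
    · rw [hab']
      rw [PySem.List.pyRange_one_eq_nil (le_refl _)]
      simp
    · have hab2 : a ≤ b := by omega
      have : ((b : Int) + 1) = ((b + 1 : Nat) : Int) := by push_cast; ring
      rw [show ((b + 1 : Nat) : Int) = (b : Int) + 1 by push_cast; ring,
        PySem.List.pyRange_one_succ_right (by exact_mod_cast hab2)]
      rw [List.map_append, ih (by omega) hab2]
      have hbl : b < exps.length := by omega
      have hget : PySem.List.pyGet? exps (b : Int) = some exps[b] := by
        rw [PySem.List.pyGet?_natCast]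
        simp [hbl]
      simp only [List.map_cons, List.map_nil, hget, Option.getD_some]
      have hdt : ((exps.map pvIdOf).drop a).take (b + 1 - a) =
          ((exps.map pvIdOf).drop a).take (b - a) ++ [(exps.map pvIdOf)[b]'(by simpa using hbl)] := by
        rw [show b + 1 - a = (b - a) + 1 by omega, List.take_add_one]
        congr 1
        have : (exps.map pvIdOf).length = exps.length := by simp
        rw [List.getElem?_drop]
        simp only [show a + (b - a) = b by omega]
        rw [List.getElem?_eq_getElem (by omega)]
        rfl
      rw [hdt]
      congr 1
      simp [pvIdOf]

-- ---- arithmetic about ceiling division ----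

theorem pvCeil_eq (n k : Nat) (hk : 1 ≤ k) :
    (n + k - 1) / k = if n % k = 0 then n / k else n / k + 1 := by
  obtain ⟨q, r, hr, hn⟩ : ∃ q r, r < k ∧ n = k * q + r :=
    ⟨n / k, n % k, Nat.mod_lt n (by omega), (Nat.div_add_mod n k).symm ▸ by omega⟩
  subst hn
  have hm : (k * q + r) % k = r := by
    simp [Nat.add_mod, Nat.mul_mod_right, Nat.mod_eq_of_lt hr]
  have hq : (k * q + r) / k = q := by
    rw [Nat.mul_add_div (by omega), Nat.div_eq_of_lt hr]; omega
  by_cases h0 : r = 0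
  · rw [hm, if_pos h0, hq]
    subst h0
    rw [show k * q + 0 + k - 1 = k * q + (k - 1) by omega,
      Nat.mul_add_div (by omega), Nat.div_eq_of_lt (by omega)]
    omega
  · rw [hm, if_neg h0, hq]
    rw [show k * q + r + k - 1 = k * q + (r + k - 1) by omega,
      Nat.mul_add_div (by omega)]
    have : (r + k - 1) / k = 1 := by
      apply Nat.div_eq_of_lt_le <;> omega
    omega

theorem pvCeil_mul_ge (n k : Nat) (hk : 1 ≤ k) : n ≤ ((n + k - 1) / k) * k := by
  rw [pvCeil_eq n k hk]
  have hdm := Nat.div_add_mod n k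
  have hc : n / k * k = k * (n / k) := Nat.mul_comm _ _
  have hmlt : n % k < k := Nat.mod_lt n (by omega)
  by_cases h0 : n % k = 0
  · rw [if_pos h0]; omega
  · rw [if_neg h0]
    have : (n / k + 1) * k = n / k * k + k := by ring
    omega

theorem pvCeil_chunk_lt (n k : Nat) (hk : 1 ≤ k) :
    ∀ s, s < (n + k - 1) / k → s * k < n := by
  intro s hs
  rw [pvCeil_eq n k hk] at hs
  have hdm := Nat.div_add_mod n k
  have hc : n / k * k = k * (n / k) := Nat.mul_comm _ _
  have hmlt : n % k < k := Nat.mod_lt n (by omega)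
  by_cases h0 : n % k = 0
  · rw [if_pos h0] at hs
    have h1 : (s + 1) * k ≤ n / k * k := Nat.mul_le_mul_right k (by omega)
    have h2 : (s + 1) * k = s * k + k := by ring
    omega
  · rw [if_neg h0] at hs
    have h1 : s * k ≤ n / k * k := Nat.mul_le_mul_right k (by omega)
    omega

theorem pvCeil_le (n k m : Nat) (hk : 1 ≤ k) (hm : n ≤ m * k) : (n + k - 1) / k ≤ m := by
  rw [pvCeil_eq n k hk]
  have hdm := Nat.div_add_mod n k
  have hc : n / k * k = k * (n / k) := Nat.mul_comm _ _
  have hmk : m * k = k * m := Nat.mul_comm _ _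
  have hmlt : n % k < k := Nat.mod_lt n (by omega)
  by_cases h0 : n % k = 0
  · rw [if_pos h0]
    by_contra hcon
    rw [Nat.not_le] at hcon
    have : (m + 1) * k ≤ n / k * k := Nat.mul_le_mul_right k (by omega)
    have h2 : (m + 1) * k = m * k + k := by ring
    omega
  · rw [if_neg h0]
    by_contra hcon
    rw [Nat.not_le] at hcon
    have : m * k ≤ n / k * k := Nat.mul_le_mul_right k (by omega)
    omega

-- ---- the two loop bodies, named for the proofs ----

def pvStepA (experiments : List (List (String × Int))) (nI kI : Int)
    (acc : PySem.Dict String (List Int)) (i : Int) : PySem.Dict String (List Int) :=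
  let vm_name := "scdiffeq-vm-" ++ PySem.Int.toStr (i + 1)
  let start_idx := i * kI
  let end_idx := min ((i + 1) * kI) nI
  let vm_experiments := (PySem.List.pyRange start_idx end_idx 1).map
    (fun j => ((PySem.Dict.mk ((PySem.List.pyGet? experiments j).getD [])).get? "id").getD 0)
  if vm_experiments ≠ [] then acc.insert vm_name vm_experiments else acc

def pvStepB (acc : PySem.Dict String (List Int)) (p : List (String × Int) × String) :
    PySem.Dict String (List Int) :=
  acc.insert p.2 (acc.getD p.2 [] ++ [((PySem.Dict.mk p.1).get? "id").getD 0])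

def pvNames (mN k : Nat) : List String :=
  (List.range mN).flatMap (fun i => List.replicate k (pvNm i))

theorem pvA_eq (experiments : List (List (String × Int))) (num_vms : Int) :
    distribute_experiments experiments num_vms =
      ((PySem.List.pyRange 0 num_vms 1).foldl
        (pvStepA experiments (experiments.length : Int)
          (PySem.Int.floordiv ((experiments.length : Int) + num_vms - 1) num_vms))
        PySem.Dict.empty).items := rfl

theorem pvB_eq (experiments : List (List (String × Int))) (num_vms : Int) :
    distribute_experiments_alt experiments num_vms =
      ((experiments.zip ((PySem.List.pyRange 0 num_vms 1).flatMap
          (fun i => (PySem.List.pyRange 0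
              (PySem.Int.floordiv ((experiments.length : Int) + num_vms - 1) num_vms) 1).map
            (fun _ => "scdiffeq-vm-" ++ PySem.Int.toStr (i + 1))))).foldl
        pvStepB PySem.Dict.empty).items := rfl

-- ---- A's loop: the first g iterations build the chunks ----

theorem pvA_fold (exps : List (List (String × Int))) (k : Nat) (hk : 1 ≤ k) (t : Nat)
    (hchunk : ∀ s, s < t → s * k < exps.length) :
    (PySem.List.pyRange 0 (t : Int) 1).foldl
        (pvStepA exps (exps.length : Int) (k : Int)) PySem.Dict.empty =
      PySem.Dict.mk (pvR (exps.map pvIdOf) k t) := by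
  induction t with
  | zero =>
    rw [PySem.List.pyRange_one_eq_nil (by omega : ((0:Nat) : Int) ≤ 0)]
    rfl
  | succ t ih =>
    have hchunk' : ∀ s, s < t → s * k < exps.length := fun s hs => hchunk s (by omega)
    rw [show ((t + 1 : Nat) : Int) = (t : Int) + 1 by push_cast; ring,
      PySem.List.pyRange_one_succ_right (by exact_mod_cast t.zero_le),
      List.foldl_append, ih hchunk']
    set n := exps.length with hn
    have htk : t * k < n := hchunk t (by omega)
    -- reduce the segment to a slice of the mapped list
    have hb : min ((t + 1) * k) n ≤ n := min_le_right _ _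
    have hab : t * k ≤ min ((t + 1) * k) n := by
      have h1 : (t + 1) * k = t * k + k := by ring
      omega
    have hcast1 : ((t : Int)) * (k : Int) = ((t * k : Nat) : Int) := by push_cast; ring
    have hcast2 : min (((t : Int) + 1) * (k : Int)) ((n : Nat) : Int)
        = ((min ((t + 1) * k) n : Nat) : Int) := by
      rw [Nat.cast_min]; push_cast; ring_nf
    have hseg := pvMap_get_range exps (t * k) (min ((t + 1) * k) n) hb hab
    have hlen : ((exps.map pvIdOf).drop (t * k)).length = n - t * k := by
      simp [hn]
    have htake : ((exps.map pvIdOf).drop (t * k)).take (min ((t + 1) * k) n - t * k)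
        = ((exps.map pvIdOf).drop (t * k)).take k := by
      have h1 : (t + 1) * k = t * k + k := by ring
      rcases Nat.le_total ((t + 1) * k) n with hle | hle
      · rw [min_eq_left hle]
        congr 1
        omega
      · rw [min_eq_right hle]
        rw [List.take_of_length_le (by omega), List.take_of_length_le (by omega)]
    have hne : ((exps.map pvIdOf).drop (t * k)).take k ≠ [] := by
      apply List.ne_nil_of_length_pos
      rw [List.length_take]
      omega
    have hcont : (PySem.Dict.mk (pvR (exps.map pvIdOf) k t)).contains (pvNm t) = false := by
      rw [PySem.Dict.contains_eq_decide_mem_keys, pvR_keys]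
      exact decide_eq_false (pvNm_not_mem (le_refl t))
    show pvStepA exps (n : Int) (k : Int) (PySem.Dict.mk (pvR (exps.map pvIdOf) k t)) (t : Int)
      = PySem.Dict.mk (pvR (exps.map pvIdOf) k (t + 1))
    unfold pvStepA
    simp only [hcast1, hcast2, hseg, htake]
    rw [if_pos hne,
      show ("scdiffeq-vm-" ++ PySem.Int.toStr ((t : Int) + 1)) = pvNm t from rfl]
    apply PySem.Dict.ext
    rw [PySem.Dict.items_insert_of_not_contains _ _ hcont]
    show pvR (exps.map pvIdOf) k t ++ [(pvNm t, _)] = pvR (exps.map pvIdOf) k (t + 1)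
    unfold pvR
    rw [List.range_succ, List.map_append]
    rfl

-- A's remaining iterations (VMs past the last chunk) change nothing
theorem pvA_fold_rest (exps : List (List (String × Int))) (k g : Nat) (mI : Int)
    (hng : exps.length ≤ g * k) (_hgm : (g : Int) ≤ mI)
    (acc : PySem.Dict String (List Int)) :
    (PySem.List.pyRange (g : Int) mI 1).foldl
        (pvStepA exps (exps.length : Int) (k : Int)) acc = acc := by
  rw [PySem.List.foldl_congr_mem _ _ (fun a _ => a) acc ?_]
  · exact pvFoldl_id _ acc
  · intro acc' i hi
    rw [PySem.List.mem_pyRange_one] at hi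
    have hstop : min ((i + 1) * (k : Int)) ((exps.length : Nat) : Int) ≤ i * (k : Int) := by
      have h1 : ((exps.length : Nat) : Int) ≤ (g : Int) * (k : Int) := by
        exact_mod_cast Nat.cast_le.mpr hng
      have h2 : (g : Int) * (k : Int) ≤ i * (k : Int) :=
        mul_le_mul_of_nonneg_right hi.1 (by positivity)
      exact le_trans (min_le_right _ _) (le_trans h1 h2)
    simp [pvStepA, PySem.List.pyRange_one_eq_nil hstop]

-- ---- B's loop: the name table pairs experiment j with VM j/k + 1 ----

theorem pvNames_eq (mN k : Nat) :
    (PySem.List.pyRange 0 ((mN : Nat) : Int) 1).flatMap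
        (fun i => (PySem.List.pyRange 0 ((k : Nat) : Int) 1).map
          (fun _ => "scdiffeq-vm-" ++ PySem.Int.toStr (i + 1))) = pvNames mN k := by
  rw [PySem.List.pyRange_zero_nat mN, List.flatMap_map]
  unfold pvNames
  apply List.flatMap_congr
  intro i _
  rw [PySem.List.pyRange_zero_nat k, List.map_map]
  have : ∀ c : String, (List.range k).map (fun _ => c) = List.replicate k c := by
    intro c
    rw [List.map_const', List.length_range]
  exact this _

theorem pvNames_length (mN k : Nat) : (pvNames mN k).length = mN * k := by
  unfold pvNames
  induction mN with
  | zero => simp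
  | succ m ih =>
    rw [List.range_succ, List.flatMap_append, List.length_append, ih]
    simp [Nat.succ_mul]

theorem pvNames_getElem (mN k j : Nat) (hj : j < mN * k)
    (h : j < (pvNames mN k).length) :
    (pvNames mN k)[j] = pvNm (j / k) := by
  induction mN with
  | zero => omega
  | succ m ih =>
    have hsplit : pvNames (m + 1) k = pvNames m k ++ List.replicate k (pvNm m) := by
      unfold pvNames
      rw [List.range_succ, List.flatMap_append]
      simp
    have hlen : (pvNames m k).length = m * k := pvNames_length m k
    have hsucc : (m + 1) * k = m * k + k := Nat.succ_mul m k
    have hlen1 : (pvNames (m + 1) k).length = m * k + k := by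
      rw [pvNames_length]; omega
    have hcm : k * m = m * k := Nat.mul_comm _ _
    by_cases hcase : j < m * k
    · rw [List.getElem_of_eq hsplit, List.getElem_append_left (by omega)]
      exact ih hcase (by omega)
    · have hge : m * k ≤ j := by omega
      have hlt : j - m * k < k := by omega
      rw [List.getElem_of_eq hsplit, List.getElem_append_right (by omega)]
      rw [List.getElem_replicate]
      congr 1
      obtain ⟨r, hr, hjr⟩ : ∃ r, r < k ∧ j = k * m + r := ⟨j - m * k, by omega, by omega⟩
      rw [hjr, Nat.mul_add_div (by omega), Nat.div_eq_of_lt hr]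
      omega

theorem pvZip_eq (exps : List (List (String × Int))) (mN k : Nat)
    (hcov : exps.length ≤ mN * k) :
    exps.zip (pvNames mN k) =
      (List.range exps.length).map (fun j => ((exps[j]?).getD [], pvNm (j / k))) := by
  apply List.ext_getElem
  · rw [List.length_zip, pvNames_length, List.length_map, List.length_range]
    omega
  · intro j h1 h2
    rw [List.length_zip, pvNames_length] at h1
    have hj : j < exps.length := by omega
    simp only [List.getElem_zip, List.getElem_map, List.getElem_range]
    rw [pvNames_getElem mN k j (by omega) (by rw [pvNames_length]; omega),
      List.getElem?_eq_getElem hj]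
    rfl

theorem pvChunk_stable (l : List Int) (x : Int) (a k : Nat) (h : a + k ≤ l.length) :
    ((l ++ [x]).drop a).take k = (l.drop a).take k := by
  rw [List.drop_append_of_le_length (by omega), List.take_append_of_le_length]
  rw [List.length_drop]
  omega

theorem pvB_fold (exps : List (List (String × Int))) (k : Nat) (hk : 1 ≤ k) :
    ∀ t, t ≤ exps.length →
    ((List.range t).map (fun j => ((exps[j]?).getD [], pvNm (j / k)))).foldl
        pvStepB PySem.Dict.empty =
      PySem.Dict.mk (pvR ((exps.map pvIdOf).take t) k ((t + k - 1) / k)) := by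
  intro t
  induction t with
  | zero =>
    intro _
    have : (0 + k - 1) / k = 0 := by
      rw [Nat.zero_add]
      exact Nat.div_eq_of_lt (by omega)
    rw [this]
    rfl
  | succ t ih =>
    intro ht
    rw [List.range_succ, List.map_append, List.foldl_append, ih (by omega)]
    set ids := (exps.map pvIdOf).take t with hids
    set g' := (t + k - 1) / k with hg'
    have hgeq := pvCeil_eq t k hk
    have hdm := Nat.div_add_mod t k
    have hcomm : t / k * k = k * (t / k) := Nat.mul_comm _ _
    have hmlt : t % k < k := Nat.mod_lt t (by omega)
    have htl : t < exps.length := by omega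
    have hlen_ids : ids.length = t := by
      rw [hids, List.length_take, List.length_map]
      omega
    have hget : (exps[t]?).getD [] = exps[t] := by
      rw [List.getElem?_eq_getElem htl]
      rfl
    have hid : ((PySem.Dict.mk ((exps[t]?).getD [])).get? "id").getD 0 = pvIdOf exps[t] := by
      rw [hget]
      rfl
    have hids'' : (exps.map pvIdOf).take (t + 1) = ids ++ [pvIdOf exps[t]] := by
      rw [List.take_add_one, hids]
      congr 1
      rw [List.getElem?_map, List.getElem?_eq_getElem htl]
      rfl
    have hg'' : (t + 1 + k - 1) / k = t / k + 1 := by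
      rw [show t + 1 + k - 1 = t + k by omega, Nat.add_div_right _ (by omega)]
    rw [List.map_cons, List.map_nil, List.foldl_cons, List.foldl_nil]
    unfold pvStepB
    simp only [hid]
    by_cases h0 : t % k = 0
    · -- a fresh VM key is appended
      have hg0 : g' = t / k := by rw [hg', hgeq, if_pos h0]
      have hcont : (PySem.Dict.mk (pvR ids k g')).contains (pvNm (t / k)) = false := by
        rw [PySem.Dict.contains_eq_decide_mem_keys, pvR_keys]
        exact decide_eq_false (pvNm_not_mem (by omega))
      rw [PySem.Dict.getD_of_not_contains _ _ hcont]
      apply PySem.Dict.ext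
      rw [PySem.Dict.items_insert_of_not_contains _ _ hcont]
      show pvR ids k g' ++ [(pvNm (t / k), [] ++ [pvIdOf exps[t]])]
        = pvR ((exps.map pvIdOf).take (t + 1)) k ((t + 1 + k - 1) / k)
      rw [hg'', hids'', hg0]
      unfold pvR
      rw [List.range_succ, List.map_append]
      congr 1
      · apply List.map_congr_left
        intro s hs
        rw [List.mem_range] at hs
        have : s * k + k ≤ t := by
          have h1 : (s + 1) * k ≤ t / k * k := Nat.mul_le_mul_right k (by omega)
          have h2 : (s + 1) * k = s * k + k := by ring
          have h3 : t / k * k ≤ t := Nat.div_mul_le_self t k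
          omega
        rw [pvChunk_stable ids (pvIdOf exps[t]) (s * k) k (by omega)]
      · have hnk : t / k * k = t := Nat.div_mul_cancel (Nat.dvd_of_mod_eq_zero h0)
        simp only [List.map_cons, List.map_nil, hnk]
        have hdropgen : ∀ x : Int, (ids ++ [x]).drop t = [x] := by
          intro x
          rw [← hlen_ids, List.drop_left]
        rw [hdropgen, List.take_of_length_le (by simp; omega)]
        simp
    · -- the id is appended to the (existing) last chunk
      have hg1 : g' = t / k + 1 := by rw [hg', hgeq, if_neg h0]
      have ht0 : t / k < g' := by omega
      have hmem : (pvNm (t / k), (ids.drop (t / k * k)).take k)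
          ∈ (PySem.Dict.mk (pvR ids k g')).items := by
        show _ ∈ pvR ids k g'
        unfold pvR
        exact List.mem_map.mpr ⟨t / k, List.mem_range.mpr ht0, rfl⟩
      have hcont : (PySem.Dict.mk (pvR ids k g')).contains (pvNm (t / k)) = true := by
        rw [PySem.Dict.contains_eq_decide_mem_keys]
        exact decide_eq_true (PySem.Dict.mem_keys_of_mem_items _ hmem)
      have hnd := pvR_keys_nodup ids k g'
      rw [PySem.Dict.getD_of_mem_items _ hmem hnd]
      apply PySem.Dict.ext
      rw [PySem.Dict.items_insert_of_contains _ _ hcont]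
      show (pvR ids k g').map _
        = pvR ((exps.map pvIdOf).take (t + 1)) k ((t + 1 + k - 1) / k)
      rw [hg'', hids'', ← hg1]
      unfold pvR
      rw [List.map_map]
      apply List.map_congr_left
      intro s hs
      rw [List.mem_range] at hs
      by_cases hst : s = t / k
      · have hbeq : (pvNm s == pvNm (t / k)) = true := by
          rw [hst]; exact beq_self_eq_true _
        simp only [Function.comp_apply, hbeq, if_true]
        have ha : t / k * k ≤ t := Nat.div_mul_le_self t k
        have hlast : ((ids ++ [pvIdOf exps[t]]).drop (t / k * k)).take k
            = ids.drop (t / k * k) ++ [pvIdOf exps[t]] := by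
          rw [List.drop_append_of_le_length (by omega), List.take_of_length_le]
          simp only [List.length_append, List.length_drop, List.length_cons, List.length_nil]
          omega
        have hprev : (ids.drop (t / k * k)).take k = ids.drop (t / k * k) := by
          apply List.take_of_length_le
          rw [List.length_drop]
          omega
        rw [hst, hlast, hprev]
      · have hne : (pvNm s == pvNm (t / k)) = false := by
          rw [beq_eq_false_iff_ne]
          intro hc
          exact hst (pvNm_inj hc)
        simp only [Function.comp_apply, hne, Bool.false_eq_true, ite_false]
        have hslt : s < t / k := by omega
        have : s * k + k ≤ t := by
          have h1 : (s + 1) * k ≤ t / k * k := Nat.mul_le_mul_right k (by omega)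
          have h2 : (s + 1) * k = s * k + k := by ring
          have h3 : t / k * k ≤ t := Nat.div_mul_le_self t k
          omega
        rw [pvChunk_stable ids (pvIdOf exps[t]) (s * k) k (by omega)]

-- ===== VERDICT (by name: the statement is the Claim_ definition above) =====
theorem distribute_experiments_spec : Claim_equal_distribute_experiments := by
  intro exps m _ hPre
  obtain ⟨hm, _⟩ := hPre
  unfold Spec_distribute_experiments
  rcases lt_or_gt_of_ne hm with hneg | hpos
  · -- num_vms < 0: range(num_vms) is empty, so A builds nothing and B's name table is empty
    have hnil : PySem.List.pyRange 0 m 1 = [] := PySem.List.pyRange_one_eq_nil (by omega)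
    have hA : distribute_experiments exps m = [] := by
      rw [pvA_eq, hnil]
      rfl
    have hB : distribute_experiments_alt exps m = [] := by
      rw [pvB_eq, hnil]
      rw [List.flatMap_nil, List.zip_nil_right]
      rfl
    rw [hA, hB]
  · set mN := m.toNat with hmN
    have hmcast : m = (mN : Int) := by omega
    have hmN1 : 1 ≤ mN := by omega
    set k := (exps.length + mN - 1) / mN with hkdef
    have hkI : PySem.Int.floordiv ((exps.length : Int) + m - 1) m = (k : Int) := by
      rw [hmcast, show ((exps.length : Int) + (mN : Int) - 1)
          = ((exps.length + mN - 1 : Nat) : Int) by omega,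
        PySem.Int.floordiv_natCast]
    set g := (exps.length + k - 1) / k with hgdef
    by_cases hn0 : exps.length = 0
    · -- no experiments: A inserts nothing, B zips with nothing
      have hexps : exps = [] := List.eq_nil_of_length_eq_zero hn0
      have hA : distribute_experiments exps m = [] := by
        rw [pvA_eq, hkI]
        have hrest := pvA_fold_rest exps k 0 m (by omega)
          (by rw [Nat.cast_zero]; omega) PySem.Dict.empty
        rw [Nat.cast_zero] at hrest
        rw [hrest]
        rfl
      have hB : distribute_experiments_alt exps m = [] := by
        rw [pvB_eq, hexps]
        rfl
      rw [hA, hB]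
    · have hk1 : 1 ≤ k := by
        rw [hkdef]
        rw [Nat.le_div_iff_mul_le (by omega)]
        omega
      have hnmk : exps.length ≤ mN * k := by
        have h1 := pvCeil_mul_ge exps.length mN hmN1
        rw [← hkdef] at h1
        have hc : k * mN = mN * k := Nat.mul_comm _ _
        omega
      have hgm : g ≤ mN := pvCeil_le exps.length k mN hk1 hnmk
      have hng : exps.length ≤ g * k := pvCeil_mul_ge exps.length k hk1
      have hA : distribute_experiments exps m = pvR (exps.map pvIdOf) k g := by
        rw [pvA_eq, hkI, hmcast,
          PySem.List.pyRange_one_append 0 (g : Int) (mN : Int) (by positivity)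
            (by exact_mod_cast hgm),
          List.foldl_append,
          pvA_fold exps k hk1 g (pvCeil_chunk_lt exps.length k hk1),
          pvA_fold_rest exps k g (mN : Int) hng (by exact_mod_cast hgm)]
      have hB : distribute_experiments_alt exps m = pvR (exps.map pvIdOf) k g := by
        rw [pvB_eq, hkI, hmcast, pvNames_eq mN k, pvZip_eq exps mN k hnmk,
          pvB_fold exps k hk1 exps.length (le_refl _)]
        rw [List.take_of_length_le (by rw [List.length_map])]
      rw [hA, hB]
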